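-- pv_equiv track=rewrite | github.com/titan-23/Library_py | titan_pylib/math/get_quotients.py | get_quotients
-- ===== SOURCE A (Python) =====
-- def get_quotients(n: int) -> list[int]:
--     i = 1
--     a = []
--     while i * i <= n:
--         a.append(n // i)
--         a.append(n // (n // i))
--         i += 1
--     a.sort()
--     if not a:
--         return a
--     b = [a[0]]
--     for i in range(1, len(a)):
--         if b[-1] != a[i]:
--             b.append(a[i])
--     return b
-- ===== SOURCE B (Python) =====
-- def get_quotients(n: int) -> list[int]:
--     if n < 1:
--         return []
--     s = 1
--     while (s + 1) * (s + 1) <= n: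
--         s += 1
--     small = list(range(1, n // (s + 1) + 1))
--     large = [n // i for i in range(s, 0, -1)]
--     return small + large
-- ===== Notes on version B (the rewrite author's own statement) =====
-- stated objective: faster
-- what changed: B drops A's collect/sort/adjacent-dedup pipeline and instead concatenates the two monotone blocks of distinct quotient values (those up to the integer square root and those at indices up to it, in descending index order) which are already strictly ascending, so the sort and the dedup pass disappear.
import Mathlib
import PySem

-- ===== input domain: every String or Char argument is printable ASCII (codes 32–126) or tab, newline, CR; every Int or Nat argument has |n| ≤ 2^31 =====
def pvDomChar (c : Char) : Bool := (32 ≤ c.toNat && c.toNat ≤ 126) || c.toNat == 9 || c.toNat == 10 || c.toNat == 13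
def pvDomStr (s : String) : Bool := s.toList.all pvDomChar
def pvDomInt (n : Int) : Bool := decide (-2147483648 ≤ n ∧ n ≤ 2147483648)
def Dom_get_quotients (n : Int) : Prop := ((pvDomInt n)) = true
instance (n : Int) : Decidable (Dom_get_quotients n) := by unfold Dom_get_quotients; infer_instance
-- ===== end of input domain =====

-- B replaces A's collect-then-sort-then-adjacent-dedup pipeline by emitting the two
-- monotone blocks of distinct quotient values already in ascending order, so the sort
-- and the dedup pass disappear.

-- ===== PORT A =====
-- while i * i <= n: a.append(n // i); a.append(n // (n // i)); i += 1
def getqA_loop (n i : Int) (a : List Int) : List Int :=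
  if i * i ≤ n then
    getqA_loop n (i + 1)
      ((a ++ [PySem.Int.floordiv n i]) ++ [PySem.Int.floordiv n (PySem.Int.floordiv n i)])
  else a
termination_by (n + 1 - i).toNat
decreasing_by
  have h1 : 2 * i - 1 ≤ i * i := by nlinarith [mul_self_nonneg (i - 1)]
  have h2 : 0 ≤ i * i := mul_self_nonneg i
  omega

def get_quotients (n : Int) : List Int :=
  let a := getqA_loop n 1 []
  let a2 := PySem.List.sorted a (fun x => x)
  if a2 = [] then a2
  else
    (PySem.List.pyRange 1 (PySem.List.len a2)).foldl
      (fun b i =>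
        if PySem.List.pyGetD b (-1) 0 ≠ PySem.List.pyGetD a2 i 0 then
          b ++ [PySem.List.pyGetD a2 i 0]
        else b)
      [PySem.List.pyGetD a2 0 0]

-- ===== PORT B =====
-- while (s + 1) * (s + 1) <= n: s += 1
def getqB_sqrt (n s : Int) : Int :=
  if (s + 1) * (s + 1) ≤ n then getqB_sqrt n (s + 1) else s
termination_by (n - s).toNat
decreasing_by
  have h1 : 2 * (s + 1) - 1 ≤ (s + 1) * (s + 1) := by nlinarith [mul_self_nonneg s]
  have h2 : 0 ≤ (s + 1) * (s + 1) := mul_self_nonneg (s + 1)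
  omega

def get_quotients_alt (n : Int) : List Int :=
  if n < 1 then []
  else
    let s := getqB_sqrt n 1
    PySem.List.pyRange 1 (PySem.Int.floordiv n (s + 1) + 1) ++
      (PySem.List.pyRange s 0 (-1)).map (fun i => PySem.Int.floordiv n i)

-- ===== PRECONDITION & SPEC =====
def Spec_get_quotients (n : Int) (out : List Int) : Prop := out = get_quotients_alt n
instance (n : Int) (out : List Int) : Decidable (Spec_get_quotients n out) := by unfold Spec_get_quotients; infer_instance

-- ===== CLAIM (what is proved, stated in full; the proofs are below) =====
def Claim_equal_get_quotients : Prop := ∀ (n : Int), Dom_get_quotients n → Spec_get_quotients n (get_quotients n)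

-- ===== LEMMAS AND PROOFS =====

-- the isqrt loop of B: starting from s with s*s ≤ n it returns the integer square root
lemma getqB_sqrt_spec (n : Int) : ∀ (s : Int), 1 ≤ s → s * s ≤ n →
    1 ≤ getqB_sqrt n s ∧ getqB_sqrt n s * getqB_sqrt n s ≤ n ∧
      n < (getqB_sqrt n s + 1) * (getqB_sqrt n s + 1) := by
  intro s
  induction s using getqB_sqrt.induct (n := n) with
  | case1 s h ih =>
    intro h1 _
    rw [getqB_sqrt, if_pos h]
    exact ih (by omega) h
  | case2 s h =>
    intro h1 h2
    rw [getqB_sqrt, if_neg h]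
    exact ⟨h1, h2, by omega⟩

-- membership in A's collected list
lemma mem_getqA_loop (n : Int) : ∀ (i : Int) (acc : List Int), 1 ≤ i → ∀ (x : Int),
    (x ∈ getqA_loop n i acc ↔ x ∈ acc ∨ ∃ j, i ≤ j ∧ j * j ≤ n ∧
      (x = PySem.Int.floordiv n j ∨ x = PySem.Int.floordiv n (PySem.Int.floordiv n j))) := by
  intro i acc
  induction i, acc using getqA_loop.induct (n := n) with
  | case1 i acc h ih =>
    intro hi x
    rw [getqA_loop, if_pos h, ih (by omega) x]
    simp only [List.mem_append, List.mem_singleton]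
    constructor
    · rintro (((hx | hx) | hx) | ⟨j, hj1, hj2, hj3⟩)
      · exact Or.inl hx
      · exact Or.inr ⟨i, le_refl i, h, Or.inl hx⟩
      · exact Or.inr ⟨i, le_refl i, h, Or.inr hx⟩
      · exact Or.inr ⟨j, by omega, hj2, hj3⟩
    · rintro (hx | ⟨j, hj1, hj2, hj3⟩)
      · exact Or.inl (Or.inl (Or.inl hx))
      · by_cases hji : j = i
        · subst hji
          rcases hj3 with hx | hx
          · exact Or.inl (Or.inl (Or.inr hx))
          · exact Or.inl (Or.inr hx)
        · exact Or.inr ⟨j, by omega, hj2, hj3⟩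
  | case2 i acc h =>
    intro hi x
    rw [getqA_loop, if_neg h]
    constructor
    · exact fun hx => Or.inl hx
    · rintro (hx | ⟨j, hj1, hj2, _⟩)
      · exact hx
      · exact absurd hj2 (by nlinarith)

-- the adjacent-dedup pass of A, structurally
def dedAdj (x : Int) : List Int → List Int
  | [] => [x]
  | v :: t => if v = x then dedAdj x t else x :: dedAdj v t

lemma pyGetD_concat_neg_one (pre : List Int) (x d : Int) :
    PySem.List.pyGetD (pre ++ [x]) (-1) d = x := by
  simp [PySem.List.pyGetD, PySem.List.pyGet?, PySem.List.pyIdx?]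

lemma foldl_dedAdj (t : List Int) : ∀ (pre : List Int) (x : Int),
    t.foldl (fun b v => if PySem.List.pyGetD b (-1) 0 ≠ v then b ++ [v] else b) (pre ++ [x]) =
      pre ++ dedAdj x t := by
  induction t with
  | nil => intro pre x; simp [dedAdj]
  | cons v t ih =>
    intro pre x
    simp only [List.foldl_cons, pyGetD_concat_neg_one]
    by_cases hv : v = x
    · rw [if_neg (by simp [hv]), ih, dedAdj, if_pos hv]
    · rw [if_pos (show x ≠ v from fun h => hv h.symm)]
      have := ih (pre ++ [x]) v
      rw [this, dedAdj, if_neg hv, List.append_assoc]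
      rfl

lemma mem_dedAdj (t : List Int) : ∀ (a y : Int), y ∈ dedAdj a t ↔ y = a ∨ y ∈ t := by
  intro a y
  induction t generalizing a with
  | nil => simp [dedAdj]
  | cons v t ih =>
    by_cases h : v = a <;> simp [dedAdj, h, ih]

lemma pairwise_dedAdj (t : List Int) : ∀ (a : Int), (a :: t).Pairwise (· ≤ ·) →
    (dedAdj a t).Pairwise (· < ·) := by
  induction t with
  | nil => intro a _; simp [dedAdj]
  | cons v t ih =>
    intro a hp
    rcases List.pairwise_cons.1 hp with ⟨ha, hvt⟩
    rcases List.pairwise_cons.1 hvt with ⟨hv, _⟩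
    by_cases h : v = a
    · rw [dedAdj, if_pos h]
      exact ih a (List.pairwise_cons.2 ⟨fun y hy => (h ▸ hv) y hy, hvt.sublist (List.sublist_cons_self v t)⟩)
    · rw [dedAdj, if_neg h]
      refine List.pairwise_cons.2 ⟨?_, ih v hvt⟩
      intro y hy
      have hav : a < v := lt_of_le_of_ne (ha v (by simp)) (Ne.symm h)
      rcases (mem_dedAdj t v y).1 hy with rfl | hyt
      · exact hav
      · exact lt_of_lt_of_le hav (hv y hyt)

-- two strictly sorted lists with the same members are equal
lemma eq_of_pairwise_lt_of_mem_iff (l₁ l₂ : List Int) (h₁ : l₁.Pairwise (· < ·))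
    (h₂ : l₂.Pairwise (· < ·)) (h : ∀ x, x ∈ l₁ ↔ x ∈ l₂) : l₁ = l₂ := by
  have n₁ : l₁.Nodup := h₁.imp ne_of_lt
  have n₂ : l₂.Nodup := h₂.imp ne_of_lt
  have hp : l₁.Perm l₂ := (List.perm_ext_iff_of_nodup n₁ n₂).2 h
  exact List.eq_of_perm_of_sorted (fun a b _ _ hab hba => le_antisymm hab hba)
    (h₁.imp le_of_lt) (h₂.imp le_of_lt) hp

-- arithmetic facts about quotients below/above the integer square root
lemma div_ge_s {n s j : Int} (hs0 : 0 ≤ s) (hs2 : s * s ≤ n) (hj : 1 ≤ j) (hjs : j ≤ s) :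
    s ≤ n / j :=
  (Int.le_ediv_iff_mul_le (by omega)).2
    (le_trans (mul_le_mul_of_nonneg_left hjs hs0) hs2)

lemma div_strict_anti {n s i j : Int} (hs2 : s * s ≤ n) (hi : 1 ≤ i) (hij : i < j)
    (hjs : j ≤ s) : n / j < n / i := by
  have hj : 1 ≤ j := by omega
  have hs0 : 0 ≤ s := by omega
  have hqs : s ≤ n / j := div_ge_s hs0 hs2 hj hjs
  have hq0 : 1 ≤ n / j := by omega
  have hkv : n / j * j ≤ n := Int.ediv_mul_le n (by omega)
  have h1 : n / j * (i + 1) ≤ n / j * j := by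
    apply mul_le_mul_of_nonneg_left (by omega) (by omega)
  have h2 : n / j + n / j * i ≤ n := by nlinarith
  have h3 : (n / j + n / j * i) / i = n / j / i + n / j :=
    Int.add_mul_ediv_right _ _ (by omega)
  have h4 : 1 ≤ n / j / i := (Int.le_ediv_iff_mul_le (by omega)).2 (by omega)
  have h5 : (n / j + n / j * i) / i ≤ n / i := Int.ediv_le_ediv (by omega) h2
  omega

lemma div_le_sqrt {n s : Int} (hs0 : 0 ≤ s) (hs3 : n < (s + 1) * (s + 1)) :
    n / (s + 1) ≤ s := by
  have := (Int.ediv_lt_iff_lt_mul (a := n) (b := s + 1) (c := s + 1) (by omega)).2 hs3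
  omega

lemma div_border {n s : Int} (hs1 : 1 ≤ s) (hs2 : s * s ≤ n) (hs3 : n < (s + 1) * (s + 1)) :
    n / (s + 1) < n / s := by
  have hms : n / (s + 1) ≤ s := div_le_sqrt (by omega) hs3
  have h1 : s ≤ n / s := div_ge_s (by omega) hs2 hs1 le_rfl
  by_cases hm : n / (s + 1) = s
  · have h2 : s * (s + 1) ≤ n := by
      have := (Int.le_ediv_iff_mul_le (a := s) (b := n) (c := s + 1) (by omega)).1 (by omega)
      omega
    have h3 : s + 1 ≤ n / s := (Int.le_ediv_iff_mul_le (by omega)).2 (by nlinarith)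
    omega
  · omega

lemma div_antitone_above {n s q : Int} (hn : 1 ≤ n) (hq : s + 1 ≤ q) (hs0 : 0 ≤ s) :
    n / q ≤ n / (s + 1) := by
  by_contra hcon
  have hm0 : 0 ≤ n / (s + 1) := Int.ediv_nonneg (by omega) (by omega)
  have h1 : (n / (s + 1) + 1) * q ≤ n :=
    (Int.le_ediv_iff_mul_le (by omega)).1 (by omega)
  have h2 : (n / (s + 1) + 1) * (s + 1) ≤ (n / (s + 1) + 1) * q :=
    mul_le_mul_of_nonneg_left hq (by omega)
  have h3 : n / (s + 1) + 1 ≤ n / (s + 1) :=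
    (Int.le_ediv_iff_mul_le (by omega)).2 (by omega)
  omega

lemma div_attained {n s v : Int} (hs1 : 1 ≤ s) (hs3 : n < (s + 1) * (s + 1))
    (hv1 : 1 ≤ v) (hvm : v ≤ n / (s + 1)) : n / (n / v) = v := by
  have hvs : v ≤ s := le_trans hvm (div_le_sqrt (by omega) hs3)
  have hk : s + 1 ≤ n / v := by
    have h1 : v * (s + 1) ≤ n := (Int.le_ediv_iff_mul_le (by omega)).1 hvm
    exact (Int.le_ediv_iff_mul_le (by omega)).2 (by nlinarith)
  have hkv : n / v * v ≤ n := Int.ediv_mul_le n (by omega)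
  have hlt : n < (n / v + 1) * v := Int.lt_ediv_add_one_mul_self n (by omega)
  have hle : v ≤ n / (n / v) := (Int.le_ediv_iff_mul_le (by omega)).2 (by nlinarith)
  have hge : n / (n / v) < v + 1 := by
    apply (Int.ediv_lt_iff_lt_mul (by omega)).2
    nlinarith
  omega

-- the descending range of B
lemma pyRange_desc (s : Int) (hs : 1 ≤ s) :
    PySem.List.pyRange s 0 (-1) = (List.range s.toNat).map (fun k : Nat => s - (k : Int)) := by
  have hne : (-1 : Int) ≠ 0 := by omega
  have hpos : ¬ (0 : Int) < -1 := by omega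
  have hlt : (0 : Int) < s := by omega
  simp only [PySem.List.pyRange, if_neg hne, if_neg hpos, if_pos hlt]
  have : ((s - 0 + -(-1) - 1) / -(-1)) = s := by norm_num
  rw [this]
  apply List.map_congr_left
  intro k _
  ring

-- membership characterisation of A's collected list (n ≥ 1, s = isqrt n)
lemma memA_char {n s x : Int} (hn : 1 ≤ n) (hs1 : 1 ≤ s) (hs2 : s * s ≤ n)
    (hs3 : n < (s + 1) * (s + 1)) :
    (x ∈ getqA_loop n 1 [] ↔
      (1 ≤ x ∧ x ≤ n / (s + 1)) ∨ ∃ j, 1 ≤ j ∧ j ≤ s ∧ x = n / j) := by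
  rw [mem_getqA_loop n 1 [] le_rfl x]
  simp only [List.not_mem_nil, false_or]
  constructor
  · rintro ⟨j, hj1, hj2, hx⟩
    have hjs : j ≤ s := by nlinarith
    have hfd : PySem.Int.floordiv n j = n / j := PySem.Int.floordiv_eq_ediv_of_pos (by omega)
    have hq1 : 1 ≤ n / j := (Int.le_ediv_iff_mul_le (by omega)).2 (by nlinarith)
    rcases hx with rfl | rfl
    · exact Or.inr ⟨j, hj1, hjs, hfd⟩
    · rw [hfd, PySem.Int.floordiv_eq_ediv_of_pos (by omega)]
      by_cases hq : n / j ≤ s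
      · exact Or.inr ⟨n / j, hq1, hq, rfl⟩
      · refine Or.inl ⟨?_, ?_⟩
        · refine (Int.le_ediv_iff_mul_le (by omega)).2 ?_
          have : n / j ≤ n := Int.ediv_le_self j (by omega)
          omega
        · exact div_antitone_above hn (by omega) (by omega)
  · rintro (⟨hx1, hx2⟩ | ⟨j, hj1, hjs, rfl⟩)
    · refine ⟨x, hx1, by nlinarith [div_le_sqrt (show (0:Int) ≤ s by omega) hs3], Or.inr ?_⟩
      rw [show PySem.Int.floordiv n x = n / x from
        PySem.Int.floordiv_eq_ediv_of_pos (by omega)]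
      have hq1 : 1 ≤ n / x := (Int.le_ediv_iff_mul_le (by omega)).2
        (by nlinarith [div_le_sqrt (show (0:Int) ≤ s by omega) hs3])
      rw [PySem.Int.floordiv_eq_ediv_of_pos (by omega)]
      exact (div_attained hs1 hs3 hx1 hx2).symm
    · exact ⟨j, hj1, by nlinarith, Or.inl (PySem.Int.floordiv_eq_ediv_of_pos (by omega)).symm⟩

-- membership characterisation of B's output list
lemma memB_char {n s x : Int} (_hn : 1 ≤ n) (hs1 : 1 ≤ s) :
    (x ∈ PySem.List.pyRange 1 (PySem.Int.floordiv n (s + 1) + 1) ++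
        (PySem.List.pyRange s 0 (-1)).map (fun i => PySem.Int.floordiv n i) ↔
      (1 ≤ x ∧ x ≤ n / (s + 1)) ∨ ∃ j, 1 ≤ j ∧ j ≤ s ∧ x = n / j) := by
  rw [List.mem_append, PySem.List.mem_pyRange_one, pyRange_desc s hs1, List.map_map,
    PySem.Int.floordiv_eq_ediv_of_pos (show (0:Int) < s + 1 by omega)]
  constructor
  · rintro (⟨h1, h2⟩ | hx)
    · exact Or.inl ⟨h1, by omega⟩
    · simp only [List.mem_map, List.mem_range, Function.comp] at hx
      obtain ⟨k, hk, rfl⟩ := hx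
      refine Or.inr ⟨s - k, by omega, by omega, ?_⟩
      exact PySem.Int.floordiv_eq_ediv_of_pos (by omega)
  · rintro (⟨h1, h2⟩ | ⟨j, hj1, hjs, rfl⟩)
    · exact Or.inl ⟨h1, by omega⟩
    · right
      simp only [List.mem_map, List.mem_range]
      refine ⟨(s - j).toNat, by omega, ?_⟩
      show PySem.Int.floordiv n (s - ((s - j).toNat : Int)) = n / j
      rw [show s - ((s - j).toNat : Int) = j by omega]
      exact PySem.Int.floordiv_eq_ediv_of_pos (by omega)

-- B's output list is strictly increasing
lemma pairwiseB {n s : Int} (_hn : 1 ≤ n) (hs1 : 1 ≤ s) (hs2 : s * s ≤ n)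
    (hs3 : n < (s + 1) * (s + 1)) :
    (PySem.List.pyRange 1 (PySem.Int.floordiv n (s + 1) + 1) ++
        (PySem.List.pyRange s 0 (-1)).map (fun i => PySem.Int.floordiv n i)).Pairwise (· < ·) := by
  rw [List.pairwise_append]
  refine ⟨?_, ?_, ?_⟩
  · rw [PySem.List.pyRange_of_pos 1 _ (by omega)]
    exact (List.pairwise_lt_range.map _ (by intro a b hab; omega))
  · rw [pyRange_desc s hs1, List.map_map, List.pairwise_map, List.pairwise_iff_getElem]
    intro i j hi hj hij
    simp only [List.getElem_range, Function.comp]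
    rw [List.length_range] at hi hj
    rw [PySem.Int.floordiv_eq_ediv_of_pos (show (0:Int) < s - (i : Int) by omega),
      PySem.Int.floordiv_eq_ediv_of_pos (show (0:Int) < s - (j : Int) by omega)]
    exact div_strict_anti hs2 (by omega) (by omega) (by omega)
  · intro x hx y hy
    rw [PySem.List.mem_pyRange_one,
      PySem.Int.floordiv_eq_ediv_of_pos (show (0:Int) < s + 1 by omega)] at hx
    rw [pyRange_desc s hs1, List.map_map] at hy
    simp only [List.mem_map, List.mem_range, Function.comp] at hy
    obtain ⟨k, hk, rfl⟩ := hy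
    rw [PySem.Int.floordiv_eq_ediv_of_pos (show (0:Int) < s - k by omega)]
    have hge : n / s ≤ n / (s - (k : Int)) := by
      rcases eq_or_lt_of_le (show s - (k : Int) ≤ s by omega) with he | hlt
      · rw [he]
      · exact le_of_lt (div_strict_anti hs2 (by omega) hlt le_rfl)
    have hb := div_border hs1 hs2 hs3
    omega

lemma main_equal (n : Int) (hn : ¬ n < 1) : get_quotients n = get_quotients_alt n := by
  have hn1 : 1 ≤ n := by omega
  obtain ⟨hs1, hs2, hs3⟩ := getqB_sqrt_spec n 1 le_rfl (by omega)
  have hmemn : PySem.Int.floordiv n 1 ∈ getqA_loop n 1 [] := by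
    rw [mem_getqA_loop n 1 [] le_rfl]
    exact Or.inr ⟨1, le_rfl, by omega, Or.inl rfl⟩
  simp only [get_quotients, get_quotients_alt, if_neg hn]
  set s := getqB_sqrt n 1 with hs
  set a := getqA_loop n 1 [] with ha
  set c := PySem.List.sorted a (fun x => x) with hc
  have hcperm : c.Perm a := PySem.List.sorted_perm a (fun x => x) false
  have hcp : c.Pairwise (· ≤ ·) := PySem.List.sorted_pairwise a (fun x => x)
  have hcne : c ≠ [] := by
    intro h
    rw [h] at hcperm
    rw [hcperm.symm.eq_nil] at hmemn
    exact List.not_mem_nil hmemn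
  rw [if_neg hcne]
  obtain ⟨c0, ct, hct⟩ := List.ne_nil_iff_exists_cons.mp hcne
  refine Eq.trans (PySem.List.foldl_pyRange_pyGetD (a := 1) c 0
    (fun b v => if PySem.List.pyGetD b (-1) 0 ≠ v then b ++ [v] else b)
    [PySem.List.pyGetD c 0 0] (by omega)) ?_
  have h3 : PySem.List.pyGetD c 0 0 = c0 := by
    rw [hct]; simp [PySem.List.pyGetD, PySem.List.pyGet?, PySem.List.pyIdx?]
  have h2 : List.drop (1:Int).toNat c = ct := by rw [hct]; rfl
  rw [h2, h3]
  have h4 := foldl_dedAdj ct [] c0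
  rw [List.nil_append] at h4
  rw [h4, List.nil_append]
  refine eq_of_pairwise_lt_of_mem_iff _ _ ?_ (pairwiseB hn1 hs1 hs2 hs3) ?_
  · refine pairwise_dedAdj ct c0 ?_
    rw [hct] at hcp
    simpa using hcp
  · intro x
    rw [mem_dedAdj, memB_char hn1 hs1]
    have hmx : (x = c0 ∨ x ∈ ct) ↔ x ∈ a := by
      rw [← List.mem_cons, ← hct]
      exact hcperm.mem_iff
    rw [hmx, ha]
    exact memA_char hn1 hs1 hs2 hs3

-- ===== VERDICT (by name: the statement is the Claim_ definition above) =====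
theorem get_quotients_spec : Claim_equal_get_quotients := by
  intro n _
  unfold Spec_get_quotients
  by_cases hn : n < 1
  · have hA : getqA_loop n 1 [] = [] := by
      rw [getqA_loop]; simp; omega
    simp [get_quotients, get_quotients_alt, hA, hn, PySem.List.sorted]
  · exact main_equal n hn
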